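-- pv_equiv track=rewrite | github.com/Fondamenti18/fondamenti-di-programmazione | students/1795030/homework04/program02.py | Mossa_X
-- ===== SOURCE A (Python) =====
-- def Mossa_X(lista, lista2, indice, s):
--     lista1 = []
--     s1 = ''
--     if indice == len(s): return lista, lista2
--     if not s[indice] == ' ':
--         indice += 1
--         return Mossa_X(lista, lista2, indice, s)
--     else:
--         for x in s: lista1.append(x)
--         lista1[indice] = 'x'
--         for x in lista1: s1+=x
--         lista.append(s1); lista2.append(s1); indice+= 1
--         return Mossa_X(lista, lista2, indice, s)
-- ===== SOURCE B (Python) =====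
-- def Mossa_X(lista, lista2, indice, s):
--     for i in range(indice, len(s)):
--         if s[i] == ' ':
--             t = list(s)
--             t[i] = 'x'
--             v = ''.join(t)
--             lista.append(v)
--             lista2.append(v)
--     return lista, lista2
-- ===== Notes on version B (the rewrite author's own statement) =====
-- stated objective: simpler
-- what changed: Replaces A's tail recursion (with per-call char-by-char list build and string concatenation loops) by a single flat for-loop over range(indice, len(s)) that appends one variant per space; note both A and B mutate lista/lista2 in place, equivalence is about the returned pair.
-- crash fix: For indice > len(s) A raises IndexError (it indexes s[indice] before any bound check) while B's empty range simply returns (lista, lista2) unchanged. — e.g. on Mossa_X(["q"], [], 2, "a"): A raises IndexError, B returns (["q"], [])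
import Mathlib
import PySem

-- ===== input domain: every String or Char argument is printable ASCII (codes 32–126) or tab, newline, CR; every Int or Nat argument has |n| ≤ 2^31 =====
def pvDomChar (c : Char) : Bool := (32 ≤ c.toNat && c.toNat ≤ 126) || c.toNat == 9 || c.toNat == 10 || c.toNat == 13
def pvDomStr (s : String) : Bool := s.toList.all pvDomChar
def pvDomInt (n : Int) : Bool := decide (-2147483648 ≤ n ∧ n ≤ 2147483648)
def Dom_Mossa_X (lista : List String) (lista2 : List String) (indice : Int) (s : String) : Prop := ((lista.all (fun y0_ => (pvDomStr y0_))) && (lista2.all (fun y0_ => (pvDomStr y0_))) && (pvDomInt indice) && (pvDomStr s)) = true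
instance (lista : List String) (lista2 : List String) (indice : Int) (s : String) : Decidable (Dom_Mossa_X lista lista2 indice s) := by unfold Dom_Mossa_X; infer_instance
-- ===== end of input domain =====

-- B replaces A's tail recursion by a single flat loop over range(indice, len(s)) (objective: simpler);
-- both Pythons append to the passed-in lista/lista2 in place, and the equivalence proved is about the returned pair.
-- ===== PORT A =====
-- helper used by the port's termination proof
theorem pv_pyGet?_some_lt {a : Type} (xs : List a) (i : Int) (c : a)
    (h : PySem.List.pyGet? xs i = some c) : i < (xs.length : Int) := by
  by_contra hc
  have : PySem.List.pyGet? xs i = none := by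
    rw [PySem.List.pyGet?_eq_none_iff]
    intro hr
    exact hc hr.2
  simp [this] at h

def Mossa_X (lista : List String) (lista2 : List String) (indice : Int) (s : String) : List String × List String :=
  if indice = (s.toList.length : Int) then (lista, lista2)
  else
    match h : PySem.List.pyGet? s.toList indice with
    | none => (lista, lista2)  -- Python raises IndexError here (outside Pre_)
    | some c =>
      if ¬ (c = ' ') then
        Mossa_X lista lista2 (indice + 1) s
      else
        -- lista1 = list of s's chars; lista1[indice] = 'x'; s1 = join of lista1
        let lista1 := PySem.List.pySetD s.toList indice 'x'
        let s1 := String.ofList lista1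
        Mossa_X (lista ++ [s1]) (lista2 ++ [s1]) (indice + 1) s
termination_by ((s.toList.length : Int) - indice).toNat
decreasing_by
  all_goals
    have := pv_pyGet?_some_lt s.toList indice c h
    omega

-- ===== PORT B =====
def Mossa_X_alt (lista : List String) (lista2 : List String) (indice : Int) (s : String) : List String × List String :=
  (PySem.List.pyRange indice (s.toList.length : Int) 1).foldl
    (fun (acc : List String × List String) i =>
      match PySem.List.pyGet? s.toList i with
      | some c =>
        if c = ' ' then
          let v := String.ofList (PySem.List.pySetD s.toList i 'x')
          (acc.1 ++ [v], acc.2 ++ [v])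
        else acc
      | none => acc)  -- Python raises IndexError here (outside Pre_)
    (lista, lista2)

-- ===== PRECONDITION & SPEC =====
-- Pre_ excludes exactly the inputs on which Python A raises IndexError: indice outside [-len(s), len(s)].
def Pre_Mossa_X (lista : List String) (lista2 : List String) (indice : Int) (s : String) : Prop :=
  -(s.toList.length : Int) ≤ indice ∧ indice ≤ (s.toList.length : Int)
instance (lista : List String) (lista2 : List String) (indice : Int) (s : String) : Decidable (Pre_Mossa_X lista lista2 indice s) := by unfold Pre_Mossa_X; infer_instance
def pvWitness_Mossa_X : List String × List String × Int × String := (["q"], [], 0, " a b")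
-- For indice > len(s) A raises IndexError (it indexes s[indice] before any bound check) while B's empty range returns (lista, lista2) unchanged.
def Raises_Mossa_X (lista : List String) (lista2 : List String) (indice : Int) (s : String) : Prop :=
  (s.toList.length : Int) < indice
instance (lista : List String) (lista2 : List String) (indice : Int) (s : String) : Decidable (Raises_Mossa_X lista lista2 indice s) := by unfold Raises_Mossa_X; infer_instance
def pvRaiseWitness_Mossa_X : List String × List String × Int × String := (["q"], [], 2, "a")
def pvRaiseWitnessOut_Mossa_X : List String × List String := (["q"], [])
def Spec_Mossa_X (lista : List String) (lista2 : List String) (indice : Int) (s : String) (out : List String × List String) : Prop := out = Mossa_X_alt lista lista2 indice s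
instance (lista : List String) (lista2 : List String) (indice : Int) (s : String) (out : List String × List String) : Decidable (Spec_Mossa_X lista lista2 indice s out) := by unfold Spec_Mossa_X; infer_instance

-- ===== CLAIM (what is proved, stated in full; the proofs are below) =====
def Claim_equal_Mossa_X : Prop := ∀ (lista : List String) (lista2 : List String) (indice : Int) (s : String), Dom_Mossa_X lista lista2 indice s → Pre_Mossa_X lista lista2 indice s → Spec_Mossa_X lista lista2 indice s (Mossa_X lista lista2 indice s)
def Claim_raises_Mossa_X : Prop := (∀ (lista : List String) (lista2 : List String) (indice : Int) (s : String), Dom_Mossa_X lista lista2 indice s → Raises_Mossa_X lista lista2 indice s → ¬ Pre_Mossa_X lista lista2 indice s) ∧ (Dom_Mossa_X (pvRaiseWitness_Mossa_X.1) (pvRaiseWitness_Mossa_X.2.1) (pvRaiseWitness_Mossa_X.2.2.1) (pvRaiseWitness_Mossa_X.2.2.2) ∧ Raises_Mossa_X (pvRaiseWitness_Mossa_X.1) (pvRaiseWitness_Mossa_X.2.1) (pvRaiseWitness_Mossa_X.2.2.1) (pvRaiseWitness_Mossa_X.2.2.2) ∧ Mossa_X_alt (pvRaiseWitness_Mossa_X.1)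 (pvRaiseWitness_Mossa_X.2.1) (pvRaiseWitness_Mossa_X.2.2.1) (pvRaiseWitness_Mossa_X.2.2.2) = pvRaiseWitnessOut_Mossa_X)

-- ===== LEMMAS AND PROOFS =====

theorem pv_main (indice : Int) (s : String) : ∀ (lista lista2 : List String),
    -(s.toList.length : Int) ≤ indice → indice ≤ (s.toList.length : Int) →
    Mossa_X lista lista2 indice s = Mossa_X_alt lista lista2 indice s := by
  generalize hk : ((s.toList.length : Int) - indice).toNat = k
  induction k using Nat.strong_induction_on generalizing indice with
  | _ k IH =>
    intro lista lista2 h1 h2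
    rw [Mossa_X]
    by_cases he : indice = (s.toList.length : Int)
    · rw [if_pos he]
      rw [Mossa_X_alt, he, PySem.List.pyRange_one_eq_nil (le_refl _)]
      rfl
    · rw [if_neg he]
      have hlt : indice < (s.toList.length : Int) := lt_of_le_of_ne h2 he
      have hr : PySem.Raise.InRange s.toList.length indice := ⟨h1, hlt⟩
      obtain ⟨c, hc⟩ : ∃ c, PySem.List.pyGet? s.toList indice = some c := by
        cases hcase : PySem.List.pyGet? s.toList indice with
        | none => exact absurd hr ((PySem.List.pyGet?_eq_none_iff _ _).mp hcase)
        | some c => exact ⟨c, rfl⟩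
      have hBstep : Mossa_X_alt lista lista2 indice s =
          (PySem.List.pyRange (indice + 1) (s.toList.length : Int) 1).foldl
            (fun (acc : List String × List String) i =>
              match PySem.List.pyGet? s.toList i with
              | some c =>
                if c = ' ' then
                  let v := String.ofList (PySem.List.pySetD s.toList i 'x')
                  (acc.1 ++ [v], acc.2 ++ [v])
                else acc
              | none => acc)
            (if c = ' ' then
              (lista ++ [String.ofList (PySem.List.pySetD s.toList indice 'x')],
               lista2 ++ [String.ofList (PySem.List.pySetD s.toList indice 'x')])
             else (lista, lista2)) := by
        rw [Mossa_X_alt, PySem.List.pyRange_one_cons hlt, List.foldl_cons, hc]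
      have hk' : ((s.toList.length : Int) - (indice + 1)).toNat < k := by omega
      have hIH := fun la lb => IH _ hk' (indice + 1) rfl la lb (by omega) (by omega)
      rw [hBstep]
      split
      · rename_i hnone
        rw [hc] at hnone
        simp at hnone
      · rename_i c' hc'
        rw [hc] at hc'
        injection hc' with hcc
        subst hcc
        by_cases hsp : c = ' '
        · rw [if_neg (not_not_intro hsp), if_pos hsp]
          simp only [hIH]
          rw [Mossa_X_alt]
        · rw [if_pos hsp, if_neg hsp]
          simp only [hIH]
          rw [Mossa_X_alt]

-- ===== VERDICT (by name: the statement is the Claim_ definition above) =====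
theorem Mossa_X_spec : Claim_equal_Mossa_X := by
  intro lista lista2 indice s _ hpre
  exact pv_main indice s lista lista2 hpre.1 hpre.2

@[simp] theorem Mossa_X_raises : Claim_raises_Mossa_X := by
  unfold Claim_raises_Mossa_X
  exact ⟨by intro _ _ _ _ _ hr hp; unfold Raises_Mossa_X at hr; unfold Pre_Mossa_X at hp; omega, by decide⟩
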